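-- pv_equiv track=rewrite | github.com/MrBrantCode/unitest_baseline | mut_generate/mist_train_taco/taco_1839/solution.py | minimum_moves_to_empty_chests
-- ===== SOURCE A (Python) =====
-- def minimum_moves_to_empty_chests(n, a):
--     # Ensure the list 'a' has the correct length and format
--     a = [0] + a
--
--     # Check if the game can be finished based on the number of chests
--     if n < 3 or n % 2 == 0:
--         return -1
--
--     ans = 0
--     for x in range(n // 2, 0, -1):
--         d = max(0, a[2 * x], a[2 * x + 1])
--         ans += d
--         a[x] -= d
--
--     return ans + max(0, a[1])
-- ===== SOURCE B (Python) =====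
-- def minimum_moves_to_empty_chests(n, a):
--     if n < 3 or n % 2 == 0:
--         return -1
--
--     def f(x):
--         if 2 * x > n:
--             return a[x - 1], 0
--         lv, lt = f(2 * x)
--         rv, rt = f(2 * x + 1)
--         d = max(0, lv, rv)
--         return a[x - 1] - d, lt + rt + d
--
--     root, total = f(1)
--     return total + max(0, root)
-- ===== Notes on version B (the rewrite author's own statement) =====
-- stated objective: alternative
-- what changed: A sweeps indices n//2..1 over a mutated copy of the array; B does a post-order recursion on the implicit binary tree (children 2x, 2x+1), each call returning (node value after decrement, moves in subtree), with no mutation and no index sweep.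
import Mathlib
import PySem

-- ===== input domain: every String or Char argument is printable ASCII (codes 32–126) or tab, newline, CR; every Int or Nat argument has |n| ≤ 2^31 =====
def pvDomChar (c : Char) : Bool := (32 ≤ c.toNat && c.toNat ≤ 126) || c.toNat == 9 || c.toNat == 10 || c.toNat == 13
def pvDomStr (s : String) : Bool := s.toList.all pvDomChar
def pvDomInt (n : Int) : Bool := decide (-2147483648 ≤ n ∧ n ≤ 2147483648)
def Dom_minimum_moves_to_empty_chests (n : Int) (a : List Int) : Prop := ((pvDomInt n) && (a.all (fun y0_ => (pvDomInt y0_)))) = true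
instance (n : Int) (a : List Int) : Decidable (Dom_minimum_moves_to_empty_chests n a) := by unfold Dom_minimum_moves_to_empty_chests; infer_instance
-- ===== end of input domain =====

-- B replaces A's reverse index sweep over a mutated copy of the array with a post-order
-- recursion on the implicit binary tree (children 2x, 2x+1) that returns (node value after
-- decrement, moves in subtree); same return value, different decomposition (objective: alternative).

-- ===== PORT A =====
-- the loop body of port A, as a named function (definitionally the port's lambda)
def pvStep (s : Int × List Int) (x : Int) : Int × List Int :=
  let d := max (max (0:Int) (PySem.List.pyGetD s.2 (2*x) 0)) (PySem.List.pyGetD s.2 (2*x+1) 0)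
  (s.1 + d, PySem.List.pySetD s.2 x (PySem.List.pyGetD s.2 x 0 - d))

def minimum_moves_to_empty_chests (n : Int) (a : List Int) : Int :=
  let a2 : List Int := (0 : Int) :: a
  if n < 3 ∨ PySem.Int.mod n 2 = 0 then -1
  else
    let st := (PySem.List.pyRange (PySem.Int.floordiv n 2) 0 (-1)).foldl pvStep ((0:Int), a2)
    st.1 + max 0 (PySem.List.pyGetD st.2 1 0)

-- ===== PORT B =====
-- post-order recursion on node x (1-based); returns (final value at x, moves spent in x's subtree)
def pvAltF (n : Int) (a : List Int) (x : Nat) (hx : 1 ≤ x) : Int × Int :=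
  if h : 2 * (x:Int) > n then
    (PySem.List.pyGetD a ((x:Int) - 1) 0, 0)
  else
    let l := pvAltF n a (2*x) (by omega)
    let r := pvAltF n a (2*x+1) (by omega)
    let d := max (max (0:Int) l.1) r.1
    (PySem.List.pyGetD a ((x:Int) - 1) 0 - d, l.2 + r.2 + d)
termination_by n.toNat - x
decreasing_by all_goals omega

def minimum_moves_to_empty_chests_alt (n : Int) (a : List Int) : Int :=
  if n < 3 ∨ PySem.Int.mod n 2 = 0 then -1
  else
    let rt := pvAltF n a 1 (by omega)
    rt.2 + max 0 rt.1

-- ===== PRECONDITION & SPEC =====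
-- Pre_ excludes exactly the inputs where A raises IndexError: n ≥ 3 and odd but len(a) < n
-- (the loop reads a[n]); B raises there too.
def Pre_minimum_moves_to_empty_chests (n : Int) (a : List Int) : Prop :=
  (3 ≤ n ∧ PySem.Int.mod n 2 ≠ 0) → n ≤ (a.length : Int)
instance (n : Int) (a : List Int) : Decidable (Pre_minimum_moves_to_empty_chests n a) := by
  unfold Pre_minimum_moves_to_empty_chests; infer_instance
def pvWitness_minimum_moves_to_empty_chests : Int × List Int := (3, [1, 2, 3])
def Spec_minimum_moves_to_empty_chests (n : Int) (a : List Int) (out : Int) : Prop := out = minimum_moves_to_empty_chests_alt n a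
instance (n : Int) (a : List Int) (out : Int) : Decidable (Spec_minimum_moves_to_empty_chests n a out) := by unfold Spec_minimum_moves_to_empty_chests; infer_instance

-- ===== CLAIM (what is proved, stated in full; the proofs are below) =====
def Claim_equal_minimum_moves_to_empty_chests : Prop := ∀ (n : Int) (a : List Int), Dom_minimum_moves_to_empty_chests n a → Pre_minimum_moves_to_empty_chests n a → Spec_minimum_moves_to_empty_chests n a (minimum_moves_to_empty_chests n a)

-- ===== LEMMAS AND PROOFS =====

-- proof-side total twin of pvAltF (no proof argument; x = 0 treated as a leaf, never used)
def pvVT (n : Int) (a : List Int) (x : Nat) : Int × Int :=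
  if h : x = 0 ∨ n < 2 * (x:Int) then
    (PySem.List.pyGetD a ((x:Int) - 1) 0, 0)
  else
    let l := pvVT n a (2*x)
    let r := pvVT n a (2*x+1)
    let d := max (max (0:Int) l.1) r.1
    (PySem.List.pyGetD a ((x:Int) - 1) 0 - d, l.2 + r.2 + d)
termination_by n.toNat - x
decreasing_by all_goals omega

def pvDD (n : Int) (a : List Int) (x : Nat) : Int :=
  max (max 0 (pvVT n a (2*x)).1) (pvVT n a (2*x+1)).1

theorem pvVT_leaf (n : Int) (a : List Int) (x : Nat) (h : x = 0 ∨ n < 2 * (x:Int)) :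
    pvVT n a x = (PySem.List.pyGetD a ((x:Int) - 1) 0, 0) := by
  rw [pvVT]; simp [h]

theorem pvVT_internal (n : Int) (a : List Int) (x : Nat) (hx : 1 ≤ x) (h : 2 * (x:Int) ≤ n) :
    pvVT n a x = (PySem.List.pyGetD a ((x:Int) - 1) 0 - pvDD n a x,
                  (pvVT n a (2*x)).2 + (pvVT n a (2*x+1)).2 + pvDD n a x) := by
  rw [pvVT]
  have h' : ¬ (x = 0 ∨ n < 2 * (x:Int)) := by
    intro hc; rcases hc with hc | hc <;> omega
  simp [h', pvDD]

theorem pvTot_internal (n : Int) (a : List Int) (x : Nat) (hx : 1 ≤ x) (h : 2 * (x:Int) ≤ n) :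
    (pvVT n a x).2 = ((pvVT n a (2*x)).2 + (pvVT n a (2*x+1)).2) + pvDD n a x := by
  rw [pvVT_internal n a x hx h]

theorem pvAltF_eq (n : Int) (a : List Int) (x : Nat) (hx : 1 ≤ x) :
    pvAltF n a x hx = pvVT n a x := by
  fun_induction pvAltF n a x hx with
  | case1 x hx h => rw [pvVT_leaf n a x (Or.inr (by omega))]
  | case2 x hx h l r d ih2 ih1 =>
      have h' : ¬ (x = 0 ∨ n < 2 * (x:Int)) := by
        intro hc; rcases hc with hc | hc <;> omega
      rw [pvVT.eq_def]
      simp only [dif_neg h', l, r, d, ih2, ih1]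

theorem pvTot_leaf (n : Int) (a : List Int) (x : Nat) (hn : 3 ≤ n) (hodd : n % 2 = 1)
    (hx : n.toNat / 2 < x) : (pvVT n a x).2 = 0 := by
  rw [pvVT_leaf n a x (Or.inr (by omega))]

theorem pvSumPair (f : Nat → Int) (u v : Nat) :
    ∑ x ∈ Finset.Ico u v, (f (2*x) + f (2*x+1)) = ∑ y ∈ Finset.Ico (2*u) (2*v), f y := by
  induction v with
  | zero => simp
  | succ v ih =>
      by_cases hle : u ≤ v
      · rw [Finset.sum_Ico_succ_top hle, ih,
          show 2*(v+1) = (2*v+1)+1 by omega,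
          Finset.sum_Ico_succ_top (by omega : 2*u ≤ 2*v+1),
          Finset.sum_Ico_succ_top (by omega : 2*u ≤ 2*v)]
        ring
      · rw [Finset.Ico_eq_empty (by omega), Finset.Ico_eq_empty (by omega)]
        simp

theorem pvG_eq (n : Int) (a : List Int) (hn : 3 ≤ n) (hodd : n % 2 = 1) :
    ∀ (d k : Nat), 1 ≤ k → n.toNat / 2 + 1 - k ≤ d →
    ∑ x ∈ Finset.Ico k (2*k), (pvVT n a x).2
      = ∑ x ∈ Finset.Ico k (n.toNat / 2 + 1), pvDD n a x := by
  intro d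
  induction d with
  | zero =>
      intro k hk hd
      rw [Finset.sum_eq_zero (fun x hx => pvTot_leaf n a x hn hodd
            (by simp [Finset.mem_Ico] at hx; omega)),
          Finset.Ico_eq_empty (by omega), Finset.sum_empty]
  | succ d ih =>
      intro k hk hd
      by_cases hbig : n.toNat / 2 + 1 ≤ k
      · rw [Finset.sum_eq_zero (fun x hx => pvTot_leaf n a x hn hodd
              (by simp [Finset.mem_Ico] at hx; omega)),
            Finset.Ico_eq_empty (by omega), Finset.sum_empty]
      · by_cases hsp : 2*k ≤ n.toNat / 2 + 1
        · have hrw : ∀ x ∈ Finset.Ico k (2*k), (pvVT n a x).2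
              = ((pvVT n a (2*x)).2 + (pvVT n a (2*x+1)).2) + pvDD n a x := by
            intro x hx; simp only [Finset.mem_Ico] at hx
            exact pvTot_internal n a x (by omega) (by omega)
          rw [Finset.sum_congr rfl hrw, Finset.sum_add_distrib,
              pvSumPair (fun y => (pvVT n a y).2) k (2*k),
              ih (2*k) (by omega) (by omega)]
          have hc := Finset.sum_Ico_consecutive (m := k) (n := 2*k)
            (k := n.toNat / 2 + 1) (f := fun x => pvDD n a x)
            (by omega) (by omega)
          linarith [hc]
        · have hsplit := Finset.sum_Ico_consecutive (m := k) (n := n.toNat / 2 + 1)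
            (k := 2*k) (f := fun x => (pvVT n a x).2) (by omega) (by omega)
          have hz1 : ∑ x ∈ Finset.Ico (n.toNat / 2 + 1) (2*k), (pvVT n a x).2 = 0 :=
            Finset.sum_eq_zero (fun x hx => pvTot_leaf n a x hn hodd
              (by simp [Finset.mem_Ico] at hx; omega))
          have hrw : ∀ x ∈ Finset.Ico k (n.toNat / 2 + 1), (pvVT n a x).2
              = ((pvVT n a (2*x)).2 + (pvVT n a (2*x+1)).2) + pvDD n a x := by
            intro x hx; simp only [Finset.mem_Ico] at hx
            exact pvTot_internal n a x (by omega) (by omega)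
          have h2 : ∑ x ∈ Finset.Ico k (n.toNat / 2 + 1),
              ((pvVT n a (2*x)).2 + (pvVT n a (2*x+1)).2) = 0 := by
            rw [pvSumPair (fun y => (pvVT n a y).2) k (n.toNat / 2 + 1)]
            exact Finset.sum_eq_zero (fun y hy => pvTot_leaf n a y hn hodd
              (by simp [Finset.mem_Ico] at hy; omega))
          have h3 := Finset.sum_congr rfl hrw
          rw [Finset.sum_add_distrib] at h3
          linarith [hsplit, hz1, h2, h3]

theorem pvGetD_set_eq (l : List Int) (i : Nat) (v : Int) (h : i < l.length) :
    (l.set i v).getD i 0 = v := by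
  simp [List.getD_eq_getElem?_getD, h]

theorem pvGetD_set_ne (l : List Int) (i j : Nat) (v : Int) (h : i ≠ j) :
    (l.set i v).getD j 0 = l.getD j 0 := by
  simp [List.getD_eq_getElem?_getD, List.getElem?_set_ne h]

theorem pvLoop (n : Int) (a : List Int) (hn : 3 ≤ n) (hodd : n % 2 = 1)
    (hlen : n ≤ (a.length : Int)) :
    ∀ (k : Nat), 2 * (k:Int) < n → ∀ (ans : Int) (b : List Int),
    b.length = a.length + 1 →
    (∀ y : Nat, k < y → b.getD y 0 = (pvVT n a y).1) →
    (∀ y : Nat, 1 ≤ y → y ≤ k → b.getD y 0 = a.getD (y-1) 0) →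
    ((PySem.List.pyRange (k:Int) 0 (-1)).foldl pvStep (ans, b)).1
        = ans + ∑ x ∈ Finset.Ico 1 (k+1), pvDD n a x
    ∧ ∀ y : Nat, 1 ≤ y →
        ((PySem.List.pyRange (k:Int) 0 (-1)).foldl pvStep (ans, b)).2.getD y 0 = (pvVT n a y).1 := by
  intro k
  induction k with
  | zero =>
      intro hk ans b hblen hb1 hb2
      rw [show ((0:Nat):Int) = 0 from rfl, PySem.List.pyRange_neg_one_eq_nil (by omega)]
      constructor
      · simp
      · intro y hy; exact hb1 y (by omega)
  | succ k ih =>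
      intro hk ans b hblen hb1 hb2
      have hcast : (((k+1:Nat)):Int) = (k:Int) + 1 := by push_cast; ring
      rw [hcast, PySem.List.pyRange_neg_one_cons (by omega),
          show (k:Int) + 1 - 1 = (k:Int) by ring, List.foldl_cons]
      have hg1 : PySem.List.pyGetD b (2*((k:Int)+1)) 0 = b.getD (2*(k+1)) 0 := by
        rw [show 2*((k:Int)+1) = ((2*(k+1):Nat):Int) by push_cast; ring,
            PySem.List.pyGetD_natCast]
      have hg2 : PySem.List.pyGetD b (2*((k:Int)+1)+1) 0 = b.getD (2*(k+1)+1) 0 := by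
        rw [show 2*((k:Int)+1)+1 = ((2*(k+1)+1:Nat):Int) by push_cast; ring,
            PySem.List.pyGetD_natCast]
      have hg3 : PySem.List.pyGetD b ((k:Int)+1) 0 = b.getD (k+1) 0 := by
        rw [show (k:Int)+1 = ((k+1:Nat):Int) by push_cast; ring,
            PySem.List.pyGetD_natCast]
      have hset : ∀ v : Int, PySem.List.pySetD b ((k:Int)+1) v = b.set (k+1) v := by
        intro v
        rw [show (k:Int)+1 = ((k+1:Nat):Int) by push_cast; ring,
            PySem.List.pySetD_natCast]
      have hstep : pvStep (ans, b) ((k:Int)+1)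
          = (ans + pvDD n a (k+1), b.set (k+1) (a.getD k 0 - pvDD n a (k+1))) := by
        simp only [pvStep, hg1, hg2, hg3, hset]
        rw [hb1 (2*(k+1)) (by omega), hb1 (2*(k+1)+1) (by omega),
            hb2 (k+1) (by omega) (le_refl _)]
        simp [pvDD]
      rw [hstep]
      have hkl : k + 1 < b.length := by omega
      have hval : (b.set (k+1) (a.getD k 0 - pvDD n a (k+1))).getD (k+1) 0
          = (pvVT n a (k+1)).1 := by
        rw [pvGetD_set_eq _ _ _ hkl,
            pvVT_internal n a (k+1) (by omega) (by push_cast; omega)]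
        simp
      obtain ⟨ihA, ihB⟩ := ih (by omega) (ans + pvDD n a (k+1))
          (b.set (k+1) (a.getD k 0 - pvDD n a (k+1)))
          (by simp [hblen])
          (by
            intro y hy
            by_cases hyk : y = k + 1
            · subst hyk; exact hval
            · rw [pvGetD_set_ne _ _ _ _ (by omega)]
              exact hb1 y (by omega))
          (by
            intro y h1 h2
            rw [pvGetD_set_ne _ _ _ _ (by omega)]
            exact hb2 y h1 (by omega))
      refine ⟨?_, ihB⟩
      rw [ihA, Finset.sum_Ico_succ_top (by omega : 1 ≤ k+1)]
      ring

-- ===== VERDICT (by name: the statement is the Claim_ definition above) =====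
theorem minimum_moves_to_empty_chests_spec : Claim_equal_minimum_moves_to_empty_chests := by
  intro n a hdom hpre
  unfold Spec_minimum_moves_to_empty_chests
  by_cases hc : n < 3 ∨ PySem.Int.mod n 2 = 0
  · simp only [minimum_moves_to_empty_chests, minimum_moves_to_empty_chests_alt, if_pos hc]
  · have hmod : PySem.Int.mod n 2 = n % 2 := PySem.Int.mod_eq_emod_of_pos (by norm_num)
    rcases not_or.mp hc with ⟨hn3, hm⟩
    have hn : 3 ≤ n := by omega
    have hodd : n % 2 = 1 := by rw [hmod] at hm; omega
    have hlen : n ≤ (a.length : Int) := hpre ⟨hn, hm⟩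
    have hM : PySem.Int.floordiv n 2 = ((n.toNat / 2 : Nat) : Int) := by
      rw [PySem.Int.floordiv_eq_ediv_of_pos (by norm_num)]; omega
    simp only [minimum_moves_to_empty_chests, minimum_moves_to_empty_chests_alt,
      if_neg hc, hM]
    rw [pvAltF_eq n a 1 (by omega)]
    obtain ⟨h1, h2⟩ := pvLoop n a hn hodd hlen (n.toNat / 2) (by omega) 0 ((0:Int) :: a)
      (by simp)
      (by
        intro y hy
        rw [pvVT_leaf n a y (Or.inr (by omega))]
        cases y with
        | zero => omega
        | succ m =>
            rw [show ((m+1:Nat):Int) - 1 = ((m:Nat):Int) by push_cast; ring,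
                PySem.List.pyGetD_natCast]
            simp)
      (by
        intro y hy1 hy2
        cases y with
        | zero => omega
        | succ m => simp)
    have hone : PySem.List.pyGetD ((PySem.List.pyRange ((n.toNat / 2 : Nat):Int) 0 (-1)).foldl
        pvStep (0, (0:Int) :: a)).2 1 0 = (pvVT n a 1).1 := by
      rw [show (1:Int) = ((1:Nat):Int) from rfl, PySem.List.pyGetD_natCast]
      exact h2 1 (by omega)
    rw [h1, hone]
    have hsum : ∑ x ∈ Finset.Ico 1 (n.toNat / 2 + 1), pvDD n a x = (pvVT n a 1).2 := by
      have hg := pvG_eq n a hn hodd (n.toNat / 2 + 1) 1 (le_refl 1) (by omega)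
      rw [show 2*1 = 2 from rfl] at hg
      rw [← hg, Finset.sum_Ico_succ_top (le_refl 1)]
      simp
    rw [hsum]
    ring
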